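-- pv_equiv track=rewrite | github.com/isekaipudding/practice_baekjoon_algorithm | solved_ac(에센셜 문제 풀기)/해결된 Diamond 문제 목록/Diamond 4/14854.py | fct
-- ===== SOURCE A (Python) =====
-- from typing import List, Tuple
--
-- CTX = Tuple[int, int, int, List[int], List[int], List[Tuple[int, int]], int]
--
-- def fct(n: int, CTX: CTX) -> Tuple[int, int] :
--     p, _, mod, _, F, Ff, mx = CTX
--     vp = 0
--     unit = 1
--
--     # 큰 n은 블록(길이 mod) 단위 처리: p-free 곱의 주기성 활용 (odd p : 블록 곱 = -1)
--     while n >= mx :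
--         t = n // p
--         b = n // mod
--         vp += t
--         unit = (unit * F[n - b * mod]) % mod # 나머지 구간
--         if b & 1 : # odd block count -> 곱에 -1
--             unit = (-unit) % mod
--         n = t
--
--     add_vp, add_unit = Ff[n]
--     vp += add_vp
--     unit = (unit * add_unit) % mod
--     return vp, unit
-- ===== SOURCE B (Python) =====
-- def fct(n, CTX):
--     p, _, mod, _, F, Ff, mx = CTX
--     # recursive decomposition: combine this level's (possibly negated) residual
--     # factor with the recursive result for n // p on the way back up
--     def go(m):
--         if m < mx:
--             vp0, u0 = Ff[m]
--             return vp0, u0 % mod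
--         t = m // p
--         rest_vp, rest_unit = go(t)
--         f = F[m % mod]
--         if (m // mod) & 1:
--             f = -f
--         return t + rest_vp, f * rest_unit % mod
--     return go(n)
-- ===== Notes on version B (the rewrite author's own statement) =====
-- stated objective: alternative
-- what changed: B replaces A's iterative loop that threads mutable (vp, unit) accumulators top-down (negating the running accumulator on odd blocks) by a non-tail recursion on n that combines bottom-up: each level returns its pair built from the recursive result of n//p, the sign is applied to the level's own residual factor F[n % mod] instead of to the accumulator, and the base case reduces Ff[n]'s unit mod.
-- outside the precondition, e.g. on fct(4, (-2, 0, 3, [], [7, 1, 1], [(0, 1), (1, 2)], 1)): A returns (-2, 2), B returns (-2, 2)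
import Mathlib
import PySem

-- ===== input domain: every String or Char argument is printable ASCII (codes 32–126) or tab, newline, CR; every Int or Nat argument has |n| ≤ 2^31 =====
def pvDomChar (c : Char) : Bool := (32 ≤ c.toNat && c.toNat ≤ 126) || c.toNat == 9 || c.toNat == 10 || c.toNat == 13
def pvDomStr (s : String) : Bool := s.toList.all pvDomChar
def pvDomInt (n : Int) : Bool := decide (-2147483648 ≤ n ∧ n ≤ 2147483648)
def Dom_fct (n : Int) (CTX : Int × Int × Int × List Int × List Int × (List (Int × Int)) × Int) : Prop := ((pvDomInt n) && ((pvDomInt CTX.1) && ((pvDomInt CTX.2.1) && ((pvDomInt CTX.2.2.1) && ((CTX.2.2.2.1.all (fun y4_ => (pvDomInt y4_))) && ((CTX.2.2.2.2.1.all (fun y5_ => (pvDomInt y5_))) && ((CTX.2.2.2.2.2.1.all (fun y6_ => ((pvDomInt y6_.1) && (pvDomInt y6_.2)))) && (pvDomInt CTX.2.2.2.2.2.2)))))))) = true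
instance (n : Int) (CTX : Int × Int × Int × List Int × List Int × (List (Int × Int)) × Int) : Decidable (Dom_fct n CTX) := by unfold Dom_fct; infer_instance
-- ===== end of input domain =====

-- B replaces A's stateful top-down accumulator loop by a non-tail recursion on n that
-- combines bottom-up, with the odd-block sign applied to the level's own factor.

-- ===== PORT A =====
-- A's while loop, made total with fuel (on Pre_fct inputs the fuel n.toNat+1 suffices);
-- Python's 'b & 1 == 1' on ints equals 'b % 2 == 1' (exact for all ints), and 'F[i]' is
-- pyGetD (Pre_fct keeps the index in range, so the default is unreachable on admitted inputs)
def fctLoop (p md mx : Int) (F : List Int) : Nat → Int → Int → Int → Int × Int × Int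
  | 0, n, vp, u => (n, vp, u)
  | fuel + 1, n, vp, u =>
    if mx ≤ n then
      let t := PySem.Int.floordiv n p
      let b := PySem.Int.floordiv n md
      let u1 := PySem.Int.mod (u * PySem.List.pyGetD F (n - b * md) 0) md
      let u2 := if PySem.Int.mod b 2 = 1 then PySem.Int.mod (-u1) md else u1
      fctLoop p md mx F fuel t (vp + t) u2
    else (n, vp, u)

def fct (n : Int) (CTX : Int × Int × Int × List Int × List Int × (List (Int × Int)) × Int) : Int × Int :=
  match CTX with
  | (p, _, md, _, F, Ff, mx) =>
    let r := fctLoop p md mx F (n.toNat + 1) n 0 1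
    let a := PySem.List.pyGetD Ff r.1 (0, 0)
    (r.2.1 + a.1, PySem.Int.mod (r.2.2 * a.2) md)

-- ===== PORT B =====
-- Source B's recursive helper 'go', made total with the same fuel guard; at fuel 0 it
-- returns the base-case value (unreachable on Pre_fct inputs)
def fctGo (p md mx : Int) (F : List Int) (Ff : List (Int × Int)) : Nat → Int → Int × Int
  | 0, m =>
    let a := PySem.List.pyGetD Ff m (0, 0)
    (a.1, PySem.Int.mod a.2 md)
  | fuel + 1, m =>
    if m < mx then
      let a := PySem.List.pyGetD Ff m (0, 0)
      (a.1, PySem.Int.mod a.2 md)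
    else
      let t := PySem.Int.floordiv m p
      let r := fctGo p md mx F Ff fuel t
      let f0 := PySem.List.pyGetD F (PySem.Int.mod m md) 0
      let f := if PySem.Int.mod (PySem.Int.floordiv m md) 2 = 1 then -f0 else f0
      (t + r.1, PySem.Int.mod (f * r.2) md)

def fct_alt (n : Int) (CTX : Int × Int × Int × List Int × List Int × (List (Int × Int)) × Int) : Int × Int :=
  match CTX with
  | (p, _, md, _, F, Ff, mx) => fctGo p md mx F Ff (n.toNat + 1) n

-- ===== PRECONDITION & SPEC =====
-- Pre_ admits the no-loop case (n < mx, mod ≠ 0, Ff index in range: A returns whatever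
-- p and F are) and the natural looping domain of this factorial-table helper (n ≥ 0,
-- p ≥ 2, mod ≥ 1, mx ≥ 1, F covers one block, Ff covers [0, mx)); outside these A may
-- raise IndexError/ZeroDivisionError or loop forever, and on the rare excluded inputs
-- where A still returns (e.g. a negative p that happens to end the loop) B returns the
-- same value anyway.
def Pre_fct (n : Int) (CTX : Int × Int × Int × List Int × List Int × (List (Int × Int)) × Int) : Prop :=
  (n < CTX.2.2.2.2.2.2 ∧ CTX.2.2.1 ≠ 0 ∧ PySem.Raise.InRange CTX.2.2.2.2.2.1.length n) ∨
  (0 ≤ n ∧ 2 ≤ CTX.1 ∧ 1 ≤ CTX.2.2.1 ∧ 1 ≤ CTX.2.2.2.2.2.2 ∧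
   CTX.2.2.1 ≤ (CTX.2.2.2.2.1.length : Int) ∧ CTX.2.2.2.2.2.2 ≤ (CTX.2.2.2.2.2.1.length : Int))
instance (n : Int) (CTX : Int × Int × Int × List Int × List Int × (List (Int × Int)) × Int) : Decidable (Pre_fct n CTX) := by unfold Pre_fct; infer_instance

def pvWitness_fct : Int × (Int × Int × Int × List Int × List Int × (List (Int × Int)) × Int) :=
  (10, (2, 0, 3, [], [1, 2, 1], [(0, 1), (1, 1), (1, 2)], 3))

def Spec_fct (n : Int) (CTX : Int × Int × Int × List Int × List Int × (List (Int × Int)) × Int) (out : Int × Int) : Prop := out = fct_alt n CTX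
instance (n : Int) (CTX : Int × Int × Int × List Int × List Int × (List (Int × Int)) × Int) (out : Int × Int) : Decidable (Spec_fct n CTX out) := by unfold Spec_fct; infer_instance

-- ===== CLAIM (what is proved, stated in full; the proofs are below) =====
def Claim_equal_fct : Prop := ∀ (n : Int) (CTX : Int × Int × Int × List Int × List Int × (List (Int × Int)) × Int), Dom_fct n CTX → Pre_fct n CTX → Spec_fct n CTX (fct n CTX)

-- ===== LEMMAS AND PROOFS =====

theorem neg_emod_emod (a m : Int) : (-(a % m)) % m = (-a) % m :=
  Int.ModEq.neg (Int.emod_emod_of_dvd a dvd_rfl)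

theorem mul_emod_emod (a b m : Int) : ((a % m) * b) % m = (a * b) % m :=
  Int.ModEq.mul_right b (Int.emod_emod_of_dvd a dvd_rfl)

theorem mul_emod_emod' (a b m : Int) : (a * (b % m)) % m = (a * b) % m :=
  Int.ModEq.mul_left a (Int.emod_emod_of_dvd b dvd_rfl)

-- B's recursion is always reduced mod md in its second component
theorem fctGo_snd_emod (p md mx : Int) (F : List Int) (Ff : List (Int × Int))
    (hmd : 0 < md) (fuel : Nat) (m : Int) :
    (fctGo p md mx F Ff fuel m).2 % md = (fctGo p md mx F Ff fuel m).2 := by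
  have hmod : ∀ a : Int, PySem.Int.mod a md = a % md :=
    fun a => PySem.Int.mod_eq_emod_of_pos hmd
  cases fuel with
  | zero => simp [fctGo, hmod, Int.emod_emod_of_dvd _ dvd_rfl]
  | succ k =>
    by_cases h : m < mx <;>
      simp [fctGo, h, hmod, Int.emod_emod_of_dvd _ dvd_rfl]

-- A's finished loop against B's recursion, same fuel on both sides
theorem fctLoop_go (p md mx : Int) (F : List Int) (Ff : List (Int × Int)) (hmd : 0 < md) :
    ∀ (fuel : Nat) (n vp u : Int),
      (let r := fctLoop p md mx F fuel n vp u
       let a := PySem.List.pyGetD Ff r.1 ((0 : Int), (0 : Int))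
       ((r.2.1 + a.1, PySem.Int.mod (r.2.2 * a.2) md) : Int × Int))
      = (vp + (fctGo p md mx F Ff fuel n).1,
         (u * (fctGo p md mx F Ff fuel n).2) % md) := by
  have hmod : ∀ a : Int, PySem.Int.mod a md = a % md :=
    fun a => PySem.Int.mod_eq_emod_of_pos hmd
  have hmod2 : ∀ a : Int, PySem.Int.mod a 2 = a % 2 :=
    fun a => PySem.Int.mod_eq_emod_of_pos (by norm_num)
  intro fuel
  induction fuel with
  | zero =>
    intro n vp u
    simp [fctLoop, fctGo, hmod, mul_emod_emod']
  | succ k ih =>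
    intro n vp u
    by_cases h : mx ≤ n
    · have hn : ¬ n < mx := not_lt.2 h
      have hidx : n - PySem.Int.floordiv n md * md = PySem.Int.mod n md := by
        have h1 := PySem.Int.floordiv_mul_add_mod n md
        omega
      simp only [fctLoop, fctGo, h, if_pos, hn, if_false, ih]
      refine Prod.ext ?_ ?_
      · ring
      · simp only [hmod, hmod2] at *
        rw [hidx]
        set ru := (fctGo p md mx F Ff k (PySem.Int.floordiv n p)).2
        set f0 := PySem.List.pyGetD F (PySem.Int.mod n md) 0
        by_cases hb : PySem.Int.floordiv n md % 2 = 1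
        · simp only [hb, if_pos]
          rw [neg_emod_emod, mul_emod_emod, mul_emod_emod']
          congr 1; ring
        · simp only [hb, if_false]
          rw [mul_emod_emod, mul_emod_emod']
          congr 1; ring
    · have hn : n < mx := not_le.1 h
      simp [fctLoop, fctGo, h, hn, hmod, mul_emod_emod']

-- ===== VERDICT (by name: the statement is the Claim_ definition above) =====
theorem fct_spec : Claim_equal_fct := by
  intro n CTX _ hpre
  obtain ⟨p, q, md, G, F, Ff, mx⟩ := CTX
  rcases hpre with ⟨hlt, -, -⟩ | hpre
  · -- the loop exits immediately and the recursion takes its base case at once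
    have hnm : ¬ mx ≤ n := not_le.2 hlt
    unfold Spec_fct fct fct_alt
    simp [fctLoop, fctGo, hnm, hlt]
  · have hmd : (0 : Int) < md := lt_of_lt_of_le one_pos hpre.2.2.1
    unfold Spec_fct fct fct_alt
    dsimp only
    rw [fctLoop_go p md mx F Ff hmd (n.toNat + 1) n 0 1]
    refine Prod.ext (by simp) ?_
    simp only [one_mul]
    exact fctGo_snd_emod p md mx F Ff hmd (n.toNat + 1) n
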